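-- pv_equiv track=rewrite | github.com/gaestu/SurfSifter | src/extractors/browser/chromium/site_engagement/extractor.py | _extract_profile_from_path
-- ===== SOURCE A (Python) =====
-- def _extract_profile_from_path(path: str, browser: str) -> str:
--     """Extract profile name from Preferences path."""
--     parts = path.replace("\\", "/").split("/")
--
--     # Look for "User Data" or browser-specific profile markers
--     for i, part in enumerate(parts):
--         if part.lower() == "user data" and i + 1 < len(parts):
--             return parts[i + 1]
--         if part.lower() == "profiles" and i + 1 < len(parts):
--             return parts[i + 1]
--
--     return "Default"
-- ===== SOURCE B (Python) =====
-- def _extract_profile_from_path(path: str, browser: str) -> str: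
--     """Extract profile name from Preferences path."""
--     norm = path.replace("\\", "/")
--     # search the flat lowercased string for a whole-component marker followed by '/'
--     hay = "/" + norm.lower()
--     best, skip = -1, 0
--     for marker in ("/user data/", "/profiles/"):
--         p = hay.find(marker)
--         if p != -1 and (best == -1 or p < best):
--             best, skip = p, len(marker)
--     if best == -1:
--         return "Default"
--     start = best + skip - 1          # index in norm where the profile component begins
--     end = norm.find("/", start)
--     return norm[start:end] if end != -1 else norm[start:]
-- ===== Notes on version B (the rewrite author's own statement) =====
-- stated objective: alternative
-- what changed: Replaces A's split('/')-then-scan-components loop by a flat-string algorithm: search the lowercased '/'-normalized path (with a leading '/' sentinel) for the earliest whole-component substring '/user data/' or '/profiles/', then slice the following component out of the original string by index - no component list is ever built.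
import Mathlib
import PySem

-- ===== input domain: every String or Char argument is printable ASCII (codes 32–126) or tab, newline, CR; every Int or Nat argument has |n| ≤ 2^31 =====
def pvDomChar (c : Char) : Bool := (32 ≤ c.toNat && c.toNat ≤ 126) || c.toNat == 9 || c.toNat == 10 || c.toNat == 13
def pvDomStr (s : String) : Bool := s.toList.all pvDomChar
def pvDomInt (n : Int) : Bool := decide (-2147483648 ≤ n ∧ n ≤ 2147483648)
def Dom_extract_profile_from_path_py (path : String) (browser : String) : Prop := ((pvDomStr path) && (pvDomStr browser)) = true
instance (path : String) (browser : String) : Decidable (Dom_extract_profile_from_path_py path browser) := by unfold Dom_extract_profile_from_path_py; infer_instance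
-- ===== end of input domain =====

-- B replaces A's split-into-components scan by substring search on the flat normalized
-- string (find the earliest "/marker/" occurrence, then slice the next component out by
-- index) — a different algorithm over the same input, no component list is built.


-- ===== PORT A =====
-- A's for-loop over enumerate(parts): returns parts[i+1] on a marker hit (the guard keeps
-- the index in range, so getD never sees its default)
def pvLoopA (parts : List String) : List (Int × String) → String
  | [] => "Default"
  | (i, part) :: rest =>
    if PySem.Str.lower part = "user data" ∧ i + 1 < (parts.length : Int) then
      (PySem.List.pyGet? parts (i + 1)).getD ""
    else if PySem.Str.lower part = "profiles" ∧ i + 1 < (parts.length : Int) then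
      (PySem.List.pyGet? parts (i + 1)).getD ""
    else pvLoopA parts rest

def extract_profile_from_path_py (path : String) (browser : String) : String :=
  -- split? is some since the separator "/" is nonempty
  let parts := (PySem.Str.split? (PySem.Str.replace path "\\" "/") "/").getD []
  pvLoopA parts (PySem.List.enumerate parts 0)

-- ===== PORT B =====
-- Source B after `norm = path.replace("\\","/")`: search hay = "/" + norm.lower() for the two
-- whole-component markers, keep the earliest hit (best, skip), then slice norm[start:end]
-- (ported on List Char throughout; String.ofList packs the final slice)
def pvBCore (norm : List Char) : String :=
  let hay : List Char := '/' :: PySem.Chars.lower norm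
  let bs : Int × Int :=
    ["/user data/".toList, "/profiles/".toList].foldl
      (fun (bs : Int × Int) m =>
        let p := PySem.Chars.find hay m
        if p ≠ -1 ∧ (bs.1 = -1 ∨ p < bs.1) then (p, (m.length : Int)) else bs)
      (-1, 0)
  if bs.1 = -1 then "Default"
  else
    let start := bs.1 + bs.2 - 1
    let e := PySem.Chars.findFrom norm ['/'] start
    if e ≠ -1 then String.ofList (PySem.Chars.slice norm (some start) (some e))
    else String.ofList (PySem.Chars.slice norm (some start) none)

def extract_profile_from_path_py_alt (path : String) (browser : String) : String :=
  pvBCore (PySem.Chars.replace path.toList ['\\'] ['/'])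

-- ===== PRECONDITION & SPEC =====
def Spec_extract_profile_from_path_py (path : String) (browser : String) (out : String) : Prop := out = extract_profile_from_path_py_alt path browser
instance (path : String) (browser : String) (out : String) : Decidable (Spec_extract_profile_from_path_py path browser out) := by unfold Spec_extract_profile_from_path_py; infer_instance

-- ===== CLAIM (what is proved, stated in full; the proofs are below) =====
def Claim_equal_extract_profile_from_path_py : Prop := ∀ (path : String) (browser : String), Dom_extract_profile_from_path_py path browser → Spec_extract_profile_from_path_py path browser (extract_profile_from_path_py path browser)

-- ===== LEMMAS AND PROOFS =====

def pvSplit : List Char → List Char × List (List Char)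
  | [] => ([], [])
  | c :: t =>
    let r := pvSplit t
    if c = '/' then ([], r.1 :: r.2) else (c :: r.1, r.2)
def pvJoin : List (List Char) → List Char
  | [] => []
  | [c] => c
  | c :: c' :: r => c ++ '/' :: pvJoin (c' :: r)

theorem pvGoSpec (fuel : Nat) (l cur : List Char) (acc : List (List Char))
    (h : l.length ≤ fuel) :
    PySem.Chars.splitOn.go ['/'] fuel l cur acc =
      acc.reverse ++ (cur.reverse ++ (pvSplit l).1) :: (pvSplit l).2 := by
  induction fuel generalizing l cur acc with
  | zero =>
    have : l = [] := by cases l <;> simp_all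
    subst this
    rw [PySem.Chars.splitOn.go]
    simp [pvSplit]
  | succ fuel ih =>
    cases l with
    | nil =>
      rw [PySem.Chars.splitOn.go]
      · simp [pvSplit]
      · omega
    | cons c rest =>
      rw [PySem.Chars.splitOn.go]
      by_cases hc : c = '/'
      · subst hc
        have hpre : List.isPrefixOf ['/'] ('/' :: rest) = true := by simp [List.isPrefixOf]
        simp only [hpre, if_pos]
        rw [show List.drop (List.length ['/']) ('/' :: rest) = rest from by simp]
        rw [ih rest [] ((cur.reverse :: acc)) (by simpa using Nat.lt_succ_iff.mp (by simpa using h))]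
        simp [pvSplit]
      · have hpre : List.isPrefixOf ['/'] (c :: rest) = false := by
          simp [List.isPrefixOf]; exact fun h' => hc h'.symm
        simp only [hpre]
        rw [if_neg (by simp)]
        rw [ih rest (c :: cur) acc (by simp at h; omega)]
        simp [pvSplit, hc]

theorem pvSplitOn_eq (l : List Char) :
    PySem.Chars.splitOn l ['/'] = (pvSplit l).1 :: (pvSplit l).2 := by
  rw [PySem.Chars.splitOn, pvGoSpec _ _ _ _ (by omega)]
  simp

theorem pvJoin_cons (c : Char) (h : List Char) (r : List (List Char)) :
    pvJoin ((c :: h) :: r) = c :: pvJoin (h :: r) := by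
  cases r <;> simp [pvJoin]

theorem pvSplit_join (l : List Char) : pvJoin ((pvSplit l).1 :: (pvSplit l).2) = l := by
  induction l with
  | nil => simp [pvSplit, pvJoin]
  | cons c t ih =>
    by_cases hc : c = '/'
    · subst hc
      simp only [pvSplit, reduceIte]
      simp only [pvJoin]
      simpa using ih
    · simp only [pvSplit, if_neg hc]
      rw [pvJoin_cons, ih]

theorem pvSplit_slashfree (l : List Char) :
    '/' ∉ (pvSplit l).1 ∧ ∀ p ∈ (pvSplit l).2, '/' ∉ p := by
  induction l with
  | nil => simp [pvSplit]
  | cons c t ih =>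
    by_cases hc : c = '/'
    · subst hc
      simp only [pvSplit, reduceIte]
      refine ⟨by simp, ?_⟩
      intro p hp
      rcases List.mem_cons.mp hp with hp | hp
      · exact hp ▸ ih.1
      · exact ih.2 p hp
    · simp only [pvSplit, if_neg hc]
      refine ⟨?_, ih.2⟩
      intro hmem
      rcases List.mem_cons.mp hmem with hmem | hmem
      · exact hc hmem.symm
      · exact ih.1 hmem

theorem pvLowerChar_ne_slash (c : Char) (h : c ≠ '/') : PySem.Chars.lowerChar c ≠ '/' := by
  unfold PySem.Chars.lowerChar
  split
  · rename_i hup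
    simp [PySem.Chars.isupper] at hup
    intro heq
    have hv : (c.toNat + 32) < 55296 := by
      have := hup.2
      have : c.toNat ≤ 90 := by simpa [Char.le_def] using this
      omega
    have : (Char.ofNat (c.toNat + 32)).toNat = c.toNat + 32 := by
      rw [Char.toNat_ofNat, if_pos (Or.inl hv)]
    rw [heq] at this
    have h65 : 65 ≤ c.toNat := by simpa [Char.le_def] using hup.1
    simp at this
    omega
  · exact h

theorem pvLower_append (a b : List Char) :
    PySem.Chars.lower (a ++ b) = PySem.Chars.lower a ++ PySem.Chars.lower b := by
  simp [PySem.Chars.lower]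

theorem pvLower_slashfree (p : List Char) (h : '/' ∉ p) : '/' ∉ PySem.Chars.lower p := by
  simp only [PySem.Chars.lower, List.mem_map]
  rintro ⟨c, hc, heq⟩
  exact pvLowerChar_ne_slash c (fun hcs => h (hcs ▸ hc)) heq

theorem pvFind_eq_of (s sub : List Char) (k : Nat) (h1 : sub <+: s.drop k)
    (h2 : ∀ i < k, ¬ sub <+: s.drop i) : PySem.Chars.find s sub = (k : Int) := by
  have hin : sub <:+: s := h1.isInfix.trans (s.drop_suffix k).isInfix
  have h0 : 0 ≤ PySem.Chars.find s sub := (PySem.Chars.find_nonneg_iff s sub).2 hin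
  obtain ⟨hpre, hmin⟩ := PySem.Chars.find_spec h0
  have hk : (PySem.Chars.find s sub).toNat = k := by
    rcases Nat.lt_trichotomy (PySem.Chars.find s sub).toNat k with hlt | heq | hgt
    · exact absurd hpre (h2 _ hlt)
    · exact heq
    · exact absurd h1 (hmin _ hgt)
  omega

theorem pvFind_eq_neg_of (s sub : List Char) (h : ∀ i, ¬ sub <+: s.drop i) :
    PySem.Chars.find s sub = -1 := by
  rw [PySem.Chars.find_eq_neg_one_iff]
  intro hin
  obtain ⟨j, hj⟩ := (PySem.Chars.exists_prefix_drop_iff_isIn sub s).2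
    ((PySem.Chars.isIn_iff_infix sub s).2 hin)
  exact h j hj

theorem pvSlashfree_prefix_eq (m : List Char) : ∀ (c u v : List Char), '/' ∉ m → '/' ∉ c →
    (m ++ '/' :: u <+: c ++ '/' :: v) → m = c ∧ u <+: v := by
  induction m with
  | nil =>
    intro c u v _ hc hpre
    cases c with
    | nil => simpa using hpre
    | cons a c' =>
      simp only [List.nil_append, List.cons_append, List.cons_prefix_cons] at hpre
      simp at hc
      exact absurd (hc.1 hpre.1) not_false
  | cons x m' ih =>
    intro c u v hm hc hpre
    cases c with
    | nil =>
      simp only [List.cons_append, List.nil_append, List.cons_prefix_cons] at hpre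
      simp at hm
      exact absurd (hm.1 hpre.1.symm) not_false
    | cons a c' =>
      simp only [List.cons_append, List.cons_prefix_cons] at hpre
      obtain ⟨heq, hrest⟩ := hpre
      obtain ⟨hmc, huv⟩ := ih c' u v (by simp at hm; exact hm.2) (by simp at hc; exact hc.2) hrest
      exact ⟨by rw [heq, hmc], huv⟩

theorem pvPrefix_zero_iff (m c t : List Char) (hm : '/' ∉ m) (hc : '/' ∉ c) :
    ('/' :: m ++ ['/'] <+: '/' :: (c ++ '/' :: t)) ↔ m = c := by
  constructor
  · intro hpre
    simp only [List.cons_append, List.cons_prefix_cons, true_and] at hpre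
    have := pvSlashfree_prefix_eq m c [] t hm hc (by simpa using hpre)
    exact this.1
  · rintro rfl
    simp only [List.cons_append, List.cons_prefix_cons, true_and]
    exact ⟨t, by simp⟩

theorem pvFind_at_zero (m c t : List Char) (hm : '/' ∉ m) (hc : '/' ∉ c) (h : m = c) :
    PySem.Chars.find ('/' :: (c ++ '/' :: t)) ('/' :: m ++ ['/']) = 0 := by
  have := pvFind_eq_of ('/' :: (c ++ '/' :: t)) ('/' :: m ++ ['/']) 0
    (by simpa using (pvPrefix_zero_iff m c t hm hc).2 h) (by omega)
  simpa using this

theorem pvDropMid (c t : List Char) (j : Nat) (hj : j ≤ c.length) :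
    ('/' :: (c ++ '/' :: t)).drop (j + 1) = c.drop j ++ '/' :: t := by
  show (c ++ '/' :: t).drop j = _
  rw [List.drop_append, Nat.sub_eq_zero_of_le hj, List.drop_zero]

theorem pvNoOccMid (c t r : List Char) (hc : '/' ∉ c) (j : Nat) (hj : j < c.length) :
    ¬ ('/' :: r) <+: ('/' :: (c ++ '/' :: t)).drop (j + 1) := by
  rw [pvDropMid c t j (Nat.le_of_lt hj), List.drop_eq_getElem_cons hj]
  intro hpre
  rw [List.cons_append, List.cons_prefix_cons] at hpre
  exact hc (hpre.1 ▸ c.getElem_mem hj)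

theorem pvDropPast (c t : List Char) (i : Nat) :
    ('/' :: (c ++ '/' :: t)).drop (c.length + 1 + i) = ('/' :: t).drop i := by
  rw [show c.length + 1 + i = (c.length + i) + 1 from by omega, List.drop_succ_cons,
    List.drop_append]
  rw [List.drop_eq_nil_of_le (by omega)]
  simp

theorem pvFind_shift (m c t : List Char) (hm : '/' ∉ m) (hc : '/' ∉ c) (hne : m ≠ c) :
    PySem.Chars.find ('/' :: (c ++ '/' :: t)) ('/' :: m ++ ['/']) =
      if PySem.Chars.find ('/' :: t) ('/' :: m ++ ['/']) = -1 then -1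
      else ((c.length : Int) + 1) + PySem.Chars.find ('/' :: t) ('/' :: m ++ ['/']) := by
  by_cases hinner : PySem.Chars.find ('/' :: t) ('/' :: m ++ ['/']) = -1
  · rw [if_pos hinner]
    apply pvFind_eq_neg_of
    intro i hpre
    match i with
    | 0 =>
      rw [List.drop_zero] at hpre
      exact hne ((pvPrefix_zero_iff m c t hm hc).1 hpre)
    | (j+1) =>
      by_cases hjc : j < c.length
      · exact pvNoOccMid c t (m ++ ['/']) hc j hjc hpre
      · have hj' : j + 1 = c.length + 1 + (j - c.length) := by omega
        rw [hj', pvDropPast] at hpre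
        rw [PySem.Chars.find_eq_neg_one_iff] at hinner
        exact hinner ((PySem.Chars.isIn_iff_infix _ _).1
          ((PySem.Chars.exists_prefix_drop_iff_isIn _ _).1 ⟨_, hpre⟩))
  · rw [if_neg hinner]
    have h0 : 0 ≤ PySem.Chars.find ('/' :: t) ('/' :: m ++ ['/']) := by
      have := PySem.Chars.neg_one_le_find ('/' :: t) ('/' :: m ++ ['/'])
      omega
    obtain ⟨n, hn⟩ := Int.eq_ofNat_of_zero_le h0
    obtain ⟨hpre, hmin⟩ := PySem.Chars.find_spec h0
    rw [hn] at hpre hmin ⊢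
    simp only [Int.toNat_natCast] at hpre hmin
    have := pvFind_eq_of ('/' :: (c ++ '/' :: t)) ('/' :: m ++ ['/']) (c.length + 1 + n)
      (by rw [pvDropPast]; exact hpre)
      (by
        intro i hi hpre'
        match i with
        | 0 =>
          rw [List.drop_zero] at hpre'
          exact hne ((pvPrefix_zero_iff m c t hm hc).1 hpre')
        | (j+1) =>
          by_cases hjc : j < c.length
          · exact pvNoOccMid c t (m ++ ['/']) hc j hjc hpre'
          · have hj' : j + 1 = c.length + 1 + (j - c.length) := by omega
            rw [hj', pvDropPast] at hpre'
            exact hmin (j - c.length) (by omega) hpre')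
    rw [this]
    push_cast
    ring

theorem pvFind_nosep (m c : List Char) (hc : '/' ∉ c) :
    PySem.Chars.find ('/' :: c) ('/' :: m ++ ['/']) = -1 := by
  apply pvFind_eq_neg_of
  intro i hpre
  match i with
  | 0 =>
    rw [List.drop_zero, List.cons_append, List.cons_prefix_cons] at hpre
    exact hc (hpre.2.subset (by simp))
  | (j+1) =>
    have hd : ('/' :: c).drop (j+1) = c.drop j := rfl
    rw [hd] at hpre
    by_cases hjc : j < c.length
    · rw [List.drop_eq_getElem_cons hjc, List.cons_append, List.cons_prefix_cons] at hpre
      exact hc (hpre.1 ▸ c.getElem_mem hjc)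
    · rw [List.drop_eq_nil_of_le (by omega)] at hpre
      have := hpre.length_le
      simp at this

theorem pvFind_slash_nosep (c : List Char) (hc : '/' ∉ c) :
    PySem.Chars.find c ['/'] = -1 := by
  apply pvFind_eq_neg_of
  intro i hpre
  exact hc (List.mem_of_mem_drop (hpre.subset (by simp)))

theorem pvFind_slash_at (c t : List Char) (hc : '/' ∉ c) :
    PySem.Chars.find (c ++ '/' :: t) ['/'] = (c.length : Int) := by
  apply pvFind_eq_of
  · rw [List.drop_append, Nat.sub_self, List.drop_zero, List.drop_eq_nil_of_le le_rfl]
    exact ⟨t, by simp⟩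
  · intro i hi hpre
    rw [List.drop_append, Nat.sub_eq_zero_of_le (Nat.le_of_lt hi), List.drop_zero,
      List.drop_eq_getElem_cons hi, List.cons_append, List.cons_prefix_cons] at hpre
    exact hc (hpre.1 ▸ c.getElem_mem hi)

def pvRecS : List String → String
  | [] => "Default"
  | [_] => "Default"
  | c :: nxt :: rest =>
    if PySem.Str.lower c = "user data" ∨ PySem.Str.lower c = "profiles" then nxt
    else pvRecS (nxt :: rest)

def pvRecC : List (List Char) → String
  | [] => "Default"
  | [_] => "Default"
  | c :: nxt :: rest =>
    if PySem.Chars.lower c = "user data".toList ∨ PySem.Chars.lower c = "profiles".toList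
    then String.ofList nxt
    else pvRecC (nxt :: rest)

theorem pvLoopA_eq (parts : List String) (suffix : List String) (k : Nat)
    (h : parts.drop k = suffix) :
    pvLoopA parts (PySem.List.enumerate suffix (k : Int)) = pvRecS suffix := by
  induction suffix generalizing k with
  | nil => simp [PySem.List.enumerate, pvLoopA, pvRecS]
  | cons part rest ih =>
    have hk : k < parts.length := by
      by_contra hge
      simp [List.drop_eq_nil_of_le (Nat.le_of_not_lt hge)] at h
    have hdrop1 : parts.drop (k + 1) = rest := by
      rw [← List.drop_drop, h]
      rfl
    have hlen : parts.length = k + 1 + rest.length := by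
      have h' : parts.length - k = rest.length + 1 := by
        simpa using congrArg List.length h
      omega
    rw [PySem.List.enumerate_cons]
    have hget : PySem.List.pyGet? parts ((k : Int) + 1) = rest.head? := by
      have : ((k : Int) + 1) = ((k + 1 : Nat) : Int) := by push_cast; ring
      rw [this, PySem.List.pyGet?_natCast, ← hdrop1]
      cases hd : parts.drop (k + 1) with
      | nil => simp at hd ⊢; omega
      | cons y ys =>
        have : parts[k+1]? = some y := by
          have := congrArg (fun l => l[0]?) hd
          simpa [List.getElem?_drop] using this
        simp [this]
    cases rest with
    | nil =>
      have hlt : ¬ ((k : Int) + 1 < (parts.length : Int)) := by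
        simp at hlen; omega
      simp [pvLoopA, pvRecS, hlt, PySem.List.enumerate]
    | cons nxt rest2 =>
      have hlt : (k : Int) + 1 < (parts.length : Int) := by
        simp at hlen ⊢
        omega
      have hrec := ih (k + 1) hdrop1
      by_cases h1 : PySem.Str.lower part = "user data"
      · simp [pvLoopA, pvRecS, h1, hlt, hget]
      · by_cases h2 : PySem.Str.lower part = "profiles"
        · simp [pvLoopA, pvRecS, h2, hlt, hget]
        · simp only [pvLoopA, h1, h2, false_and, if_false]
          rw [show (k : Int) + 1 = ((k + 1 : Nat) : Int) by push_cast; ring, hrec]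
          simp [pvRecS, h1, h2]


theorem pvStr_eq_iff (s t : String) : s = t ↔ s.toList = t.toList := by
  constructor
  · intro h; rw [h]
  · intro h; rw [← @String.ofList_toList s, ← @String.ofList_toList t, h]

theorem pvLowerOf_eq_iff (p : List Char) (t : String) :
    PySem.Str.lower (String.ofList p) = t ↔ PySem.Chars.lower p = t.toList := by
  rw [pvStr_eq_iff]
  simp

theorem pvRecS_map (P : List (List Char)) : pvRecS (P.map String.ofList) = pvRecC P := by
  match P with
  | [] => rfl
  | [c] => rfl
  | c :: nxt :: rest =>
    simp only [List.map_cons]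
    rw [pvRecS, pvRecC]
    simp only [pvLowerOf_eq_iff]
    by_cases hc : PySem.Chars.lower c = "user data".toList ∨ PySem.Chars.lower c = "profiles".toList
    · rw [if_pos hc, if_pos hc]
    · rw [if_neg hc, if_neg hc]
      exact pvRecS_map (nxt :: rest)


-- linking norm = c ++ '/' :: t : lowering distributes, with lowerChar '/' = '/'
theorem pvLower_cons_slash (t : List Char) :
    PySem.Chars.lower ('/' :: t) = '/' :: PySem.Chars.lower t := by
  simp [PySem.Chars.lower]
  decide

theorem pvDropPast' (c t : List Char) (i : Nat) :
    (c ++ '/' :: t).drop (c.length + 1 + i) = t.drop i := by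
  rw [List.drop_append, List.drop_eq_nil_of_le (by omega)]
  rw [show c.length + 1 + i - c.length = i + 1 from by omega]
  simp

-- the tail-extraction step of B (find the next '/', slice) is invariant under
-- prepending a whole component c ++ '/'
theorem pvTail_shift (c t : List Char) (s' : Nat) (hs' : s' ≤ t.length) :
    (let e := PySem.Chars.findFrom (c ++ '/' :: t) ['/'] ((c.length + 1 + s' : Nat) : Int)
     if e ≠ -1 then
       String.ofList (PySem.Chars.slice (c ++ '/' :: t) (some ((c.length + 1 + s' : Nat) : Int)) (some e))
     else String.ofList (PySem.Chars.slice (c ++ '/' :: t) (some ((c.length + 1 + s' : Nat) : Int)) none)) =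
    (let e := PySem.Chars.findFrom t ['/'] ((s' : Nat) : Int)
     if e ≠ -1 then String.ofList (PySem.Chars.slice t (some ((s' : Nat) : Int)) (some e))
     else String.ofList (PySem.Chars.slice t (some ((s' : Nat) : Int)) none)) := by
  have hlen : (c ++ '/' :: t).length = c.length + 1 + t.length := by simp; omega
  have hd : (c ++ '/' :: t).drop (c.length + 1 + s') = t.drop s' := pvDropPast' c t s'
  rw [PySem.Chars.findFrom_natCast _ _ _ (by omega), PySem.Chars.findFrom_natCast _ _ _ hs', hd]
  by_cases hf : PySem.Chars.find (t.drop s') ['/'] = -1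
  · rw [if_pos hf, if_pos hf]
    simp only [ne_eq, not_true_eq_false, if_false]
    simp only [PySem.Chars.slice_eq_listSlice]
    rw [PySem.List.slice_from_natCast, PySem.List.slice_from_natCast, hd]
  · rw [if_neg hf, if_neg hf]
    have h0 : 0 ≤ PySem.Chars.find (t.drop s') ['/'] := by
      have := PySem.Chars.neg_one_le_find (t.drop s') ['/']
      omega
    obtain ⟨n, hn⟩ := Int.eq_ofNat_of_zero_le h0
    rw [hn]
    have hne1 : ((c.length + 1 + s' : Nat) : Int) + (n : Int) ≠ -1 := by omega
    have hne2 : ((s' : Nat) : Int) + (n : Int) ≠ -1 := by omega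
    rw [if_pos hne1, if_pos hne2]
    rw [show ((c.length + 1 + s' : Nat) : Int) + (n : Int) = ((c.length + 1 + s' + n : Nat) : Int) from by push_cast; ring]
    rw [show ((s' : Nat) : Int) + (n : Int) = ((s' + n : Nat) : Int) from by push_cast; ring]
    simp only [PySem.Chars.slice_eq_listSlice]
    rw [PySem.List.slice_natCast, PySem.List.slice_natCast, hd]
    congr 2
    omega

-- main bridge: B's flat-string search over "/".join(P) computes A's structural scan over P
theorem pvFold_eval (hay : List Char) (p1 p2 : Int)
    (h1 : PySem.Chars.find hay ("/user data/" : String).toList = p1)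
    (h2 : PySem.Chars.find hay ("/profiles/" : String).toList = p2) :
    ([("/user data/" : String).toList, ("/profiles/" : String).toList].foldl
      (fun (bs : Int × Int) m =>
        let p := PySem.Chars.find hay m
        if p ≠ -1 ∧ (bs.1 = -1 ∨ p < bs.1) then (p, (m.length : Int)) else bs)
      (-1, 0))
    = if p2 ≠ -1 ∧ (p1 = -1 ∨ p2 < p1) then (p2, 10)
      else if p1 ≠ -1 then (p1, 11) else (-1, 0) := by
  simp only [List.foldl, h1, h2]
  rw [show (("/user data/" : String).toList.length : Int) = 11 from by decide]
  rw [show (("/profiles/" : String).toList.length : Int) = 10 from by decide]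
  by_cases c1 : p1 = -1 <;> by_cases c2 : p2 = -1 <;>
    split_ifs <;> first | rfl | (exfalso; omega) | (exfalso; simp_all)

-- main bridge: B's flat-string search over "/".join(P) computes A's structural scan over P
theorem pvMain (P : List (List Char)) (hsf : ∀ p ∈ P, '/' ∉ p) (hne : P ≠ []) :
    pvBCore (pvJoin P) = pvRecC P := by
  induction P with
  | nil => exact absurd rfl hne
  | cons c Q ih =>
    have hudsf : '/' ∉ "user data".toList := by decide
    have hprsf : '/' ∉ "profiles".toList := by decide
    have hcsf : '/' ∉ c := hsf c (by simp)
    have hlcsf : '/' ∉ PySem.Chars.lower c := pvLower_slashfree c hcsf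
    have hlclen : (PySem.Chars.lower c).length = c.length := by
      simp [PySem.Chars.lower]
    have hudpat : ("/user data/" : String).toList = '/' :: "user data".toList ++ ['/'] := by decide
    have hprpat : ("/profiles/" : String).toList = '/' :: "profiles".toList ++ ['/'] := by decide
    cases Q with
    | nil =>
      -- single component: neither two-slash pattern can occur
      simp only [pvBCore]
      rw [show pvJoin [c] = c from rfl]
      rw [pvFold_eval _ (-1) (-1)
        (by rw [hudpat]; exact pvFind_nosep _ _ hlcsf)
        (by rw [hprpat]; exact pvFind_nosep _ _ hlcsf)]
      norm_num [pvRecC]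
    | cons c1 Q' =>
      have hc1sf : '/' ∉ c1 := hsf c1 (by simp)
      have hjoin : pvJoin (c :: c1 :: Q') = c ++ '/' :: pvJoin (c1 :: Q') := rfl
      set t := pvJoin (c1 :: Q') with ht
      have hlow : PySem.Chars.lower (pvJoin (c :: c1 :: Q'))
          = PySem.Chars.lower c ++ '/' :: PySem.Chars.lower t := by
        rw [hjoin, pvLower_append, pvLower_cons_slash]
      by_cases hmatch : PySem.Chars.lower c = "user data".toList ∨ PySem.Chars.lower c = "profiles".toList
      · -- first component is a marker: B finds it at position 0
        have hbs : ∃ L : Nat, L = c.length + 2 ∧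
            (if (PySem.Chars.find ('/' :: PySem.Chars.lower (pvJoin (c :: c1 :: Q'))) ("/profiles/" : String).toList) ≠ -1 ∧
                ((PySem.Chars.find ('/' :: PySem.Chars.lower (pvJoin (c :: c1 :: Q'))) ("/user data/" : String).toList) = -1 ∨
                 (PySem.Chars.find ('/' :: PySem.Chars.lower (pvJoin (c :: c1 :: Q'))) ("/profiles/" : String).toList) <
                 (PySem.Chars.find ('/' :: PySem.Chars.lower (pvJoin (c :: c1 :: Q'))) ("/user data/" : String).toList))
             then ((PySem.Chars.find ('/' :: PySem.Chars.lower (pvJoin (c :: c1 :: Q'))) ("/profiles/" : String).toList), (10 : Int))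
             else if (PySem.Chars.find ('/' :: PySem.Chars.lower (pvJoin (c :: c1 :: Q'))) ("/user data/" : String).toList) ≠ -1
             then ((PySem.Chars.find ('/' :: PySem.Chars.lower (pvJoin (c :: c1 :: Q'))) ("/user data/" : String).toList), (11 : Int))
             else (-1, 0)) = ((0 : Int), (L : Int)) := by
          rcases hmatch with hm | hm
          · have hf1 : PySem.Chars.find ('/' :: PySem.Chars.lower (pvJoin (c :: c1 :: Q'))) ("/user data/" : String).toList = 0 := by
              rw [hudpat, hlow]
              exact pvFind_at_zero _ _ _ hudsf hlcsf hm.symm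
            have hb2 := PySem.Chars.neg_one_le_find ('/' :: PySem.Chars.lower (pvJoin (c :: c1 :: Q'))) ("/profiles/" : String).toList
            have hclen : c.length = 9 := by
              have := congrArg List.length hm
              simp [hlclen] at this
              omega
            refine ⟨11, by omega, ?_⟩
            rw [hf1]
            rw [if_neg (by rintro ⟨hne', hor⟩; rcases hor with h | h <;> omega)]
            rw [if_pos (by norm_num)]
            norm_num
          · have hf2 : PySem.Chars.find ('/' :: PySem.Chars.lower (pvJoin (c :: c1 :: Q'))) ("/profiles/" : String).toList = 0 := by
              rw [hprpat, hlow]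
              exact pvFind_at_zero _ _ _ hprsf hlcsf hm.symm
            have hb1 := PySem.Chars.neg_one_le_find ('/' :: PySem.Chars.lower (pvJoin (c :: c1 :: Q'))) ("/user data/" : String).toList
            have hclen : c.length = 8 := by
              have := congrArg List.length hm
              simp [hlclen] at this
              omega
            refine ⟨10, by omega, ?_⟩
            rw [hf2]
            have hp1ne : PySem.Chars.find ('/' :: PySem.Chars.lower (pvJoin (c :: c1 :: Q'))) ("/user data/" : String).toList ≠ 0 := by
              intro h00
              have h0 : (0:Int) ≤ PySem.Chars.find ('/' :: PySem.Chars.lower (pvJoin (c :: c1 :: Q'))) ("/user data/" : String).toList := by omega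
              have hh := (PySem.Chars.find_spec h0).1
              rw [h00] at hh
              simp only [Int.toNat_zero, List.drop_zero] at hh
              rw [hudpat, hlow] at hh
              have := (pvPrefix_zero_iff _ _ _ hudsf hlcsf).1 hh
              rw [hm] at this
              exact absurd this (by decide)
            rw [if_pos (by
              refine ⟨by norm_num, ?_⟩
              by_cases hc0 : PySem.Chars.find ('/' :: PySem.Chars.lower (pvJoin (c :: c1 :: Q'))) ("/user data/" : String).toList = -1
              · exact Or.inl hc0
              · exact Or.inr (by omega))]
            norm_num
        obtain ⟨L, hL, hbs⟩ := hbs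
        simp only [pvBCore]
        rw [pvFold_eval _ _ _ rfl rfl, hbs]
        rw [if_neg (by norm_num)]
        rw [show ((0 : Int) + (L : Int) - 1) = ((c.length + 1 + 0 : Nat) : Int) from by omega]
        rw [hjoin]
        have := pvTail_shift c t 0 (by omega)
        simp only at this
        rw [this]
        rw [show ((0 : Nat) : Int) = (0 : Int) from rfl]
        rw [show pvRecC (c :: c1 :: Q') = String.ofList c1 from by rw [pvRecC, if_pos hmatch]]
        cases Q' with
        | nil =>
          rw [show t = c1 from rfl]
          rw [show PySem.Chars.findFrom c1 ['/'] 0 = PySem.Chars.find c1 ['/'] from by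
            simpa using PySem.Chars.findFrom_zero c1 ['/']]
          rw [pvFind_slash_nosep c1 hc1sf]
          simp [PySem.Chars.slice_eq_listSlice]
        | cons c2 Q'' =>
          rw [show t = c1 ++ '/' :: pvJoin (c2 :: Q'') from rfl]
          rw [show PySem.Chars.findFrom (c1 ++ '/' :: pvJoin (c2 :: Q'')) ['/'] 0
              = PySem.Chars.find (c1 ++ '/' :: pvJoin (c2 :: Q'')) ['/'] from by
            simpa using PySem.Chars.findFrom_zero (c1 ++ '/' :: pvJoin (c2 :: Q'')) ['/']]
          rw [pvFind_slash_at c1 _ hc1sf]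
          rw [if_pos (by omega)]
          simp only [PySem.Chars.slice_eq_listSlice]
          rw [show (0 : Int) = ((0:Nat) : Int) from rfl, PySem.List.slice_natCast]
          simp
      · -- first component is no marker: both finds shift; B computes the tail's answer
        have hne1 : "user data".toList ≠ PySem.Chars.lower c := fun h => hmatch (Or.inl h.symm)
        have hne2 : "profiles".toList ≠ PySem.Chars.lower c := fun h => hmatch (Or.inr h.symm)
        have hrec : pvRecC (c :: c1 :: Q') = pvRecC (c1 :: Q') := by
          rw [pvRecC, if_neg hmatch]
        rw [hrec, ← ih (fun p hp => hsf p (List.mem_cons_of_mem c hp)) (by simp)]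
        set p1 := PySem.Chars.find ('/' :: PySem.Chars.lower t) ("/user data/" : String).toList with hp1
        set p2 := PySem.Chars.find ('/' :: PySem.Chars.lower t) ("/profiles/" : String).toList with hp2
        have hb1 : -1 ≤ p1 := hp1 ▸ PySem.Chars.neg_one_le_find _ _
        have hb2 : -1 ≤ p2 := hp2 ▸ PySem.Chars.neg_one_le_find _ _
        have hsh1 : PySem.Chars.find ('/' :: PySem.Chars.lower (pvJoin (c :: c1 :: Q'))) ("/user data/" : String).toList
            = if p1 = -1 then -1 else ((c.length : Int) + 1) + p1 := by
          rw [hlow, hudpat, hp1]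
          rw [pvFind_shift _ _ _ hudsf hlcsf hne1, hlclen, hudpat]
        have hsh2 : PySem.Chars.find ('/' :: PySem.Chars.lower (pvJoin (c :: c1 :: Q'))) ("/profiles/" : String).toList
            = if p2 = -1 then -1 else ((c.length : Int) + 1) + p2 := by
          rw [hlow, hprpat, hp2]
          rw [pvFind_shift _ _ _ hprsf hlcsf hne2, hlclen, hprpat]
        have hlen1 : p1 ≠ -1 → p1 + 11 ≤ 1 + (t.length : Int) := by
          intro h
          have h0 : 0 ≤ p1 := by omega
          have hh := (PySem.Chars.find_spec (hp1 ▸ h0)).1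
          have hl := hh.length_le
          rw [← hp1] at hl
          rw [hudpat] at hl
          simp [PySem.Chars.lower] at hl
          omega
        have hlen2 : p2 ≠ -1 → p2 + 10 ≤ 1 + (t.length : Int) := by
          intro h
          have h0 : 0 ≤ p2 := by omega
          have hh := (PySem.Chars.find_spec (hp2 ▸ h0)).1
          have hl := hh.length_le
          rw [← hp2] at hl
          rw [hprpat] at hl
          simp [PySem.Chars.lower] at hl
          omega
        simp only [pvBCore]
        by_cases h1 : p1 = -1 <;> by_cases h2 : p2 = -1
        · -- no marker anywhere
          have e1 : PySem.Chars.find ('/' :: PySem.Chars.lower (pvJoin (c :: c1 :: Q'))) ("/user data/" : String).toList = -1 := by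
            rw [hsh1, if_pos h1]
          have e2 : PySem.Chars.find ('/' :: PySem.Chars.lower (pvJoin (c :: c1 :: Q'))) ("/profiles/" : String).toList = -1 := by
            rw [hsh2, if_pos h2]
          rw [pvFold_eval _ _ _ e1 e2]
          rw [pvFold_eval ('/' :: PySem.Chars.lower t) p1 p2 hp1.symm hp2.symm]
          norm_num [h1, h2]
        · -- only "profiles" occurs
          obtain ⟨n2, hn2⟩ := Int.eq_ofNat_of_zero_le (show 0 ≤ p2 by omega)
          have hs2 : n2 + 10 ≤ 1 + t.length := by
            have := hlen2 h2
            rw [hn2] at this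
            exact_mod_cast this
          have e1 : PySem.Chars.find ('/' :: PySem.Chars.lower (pvJoin (c :: c1 :: Q'))) ("/user data/" : String).toList = -1 := by
            rw [hsh1, if_pos h1]
          have e2 : PySem.Chars.find ('/' :: PySem.Chars.lower (pvJoin (c :: c1 :: Q'))) ("/profiles/" : String).toList = (c.length : Int) + 1 + (n2 : Int) := by
            rw [hsh2, if_neg h2, hn2]
          rw [pvFold_eval _ _ _ e1 e2]
          rw [pvFold_eval ('/' :: PySem.Chars.lower t) p1 p2 hp1.symm hp2.symm]
          rw [if_pos (show (c.length : Int) + 1 + (n2 : Int) ≠ -1 ∧ ((-1 : Int) = -1 ∨ (c.length : Int) + 1 + (n2 : Int) < -1) from ⟨by omega, Or.inl rfl⟩)]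
          rw [if_pos (show p2 ≠ -1 ∧ (p1 = -1 ∨ p2 < p1) from ⟨h2, Or.inl h1⟩)]
          rw [if_neg (show ¬(((c.length : Int) + 1 + (n2 : Int), (10 : Int)).1 = -1) from by intro hh; simp at hh; omega)]
          rw [if_neg (show ¬(((p2 : Int), (10 : Int)).1 = -1) from by simpa using h2)]
          rw [show ((c.length : Int) + 1 + (n2 : Int), (10 : Int)).1 + ((c.length : Int) + 1 + (n2 : Int), (10 : Int)).2 - 1 = ((c.length + 1 + (n2 + 9) : Nat) : Int) from by push_cast; ring]
          rw [show ((p2 : Int), (10 : Int)).1 + ((p2 : Int), (10 : Int)).2 - 1 = ((n2 + 9 : Nat) : Int) from by rw [hn2]; push_cast; ring]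
          rw [hjoin]
          have := pvTail_shift c t (n2 + 9) (by omega)
          simp only at this
          rw [this]
        · -- only "user data" occurs
          obtain ⟨n1, hn1⟩ := Int.eq_ofNat_of_zero_le (show 0 ≤ p1 by omega)
          have hs1 : n1 + 11 ≤ 1 + t.length := by
            have := hlen1 h1
            rw [hn1] at this
            exact_mod_cast this
          have e1 : PySem.Chars.find ('/' :: PySem.Chars.lower (pvJoin (c :: c1 :: Q'))) ("/user data/" : String).toList = (c.length : Int) + 1 + (n1 : Int) := by
            rw [hsh1, if_neg h1, hn1]
          have e2 : PySem.Chars.find ('/' :: PySem.Chars.lower (pvJoin (c :: c1 :: Q'))) ("/profiles/" : String).toList = -1 := by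
            rw [hsh2, if_pos h2]
          rw [pvFold_eval _ _ _ e1 e2]
          rw [pvFold_eval ('/' :: PySem.Chars.lower t) p1 p2 hp1.symm hp2.symm]
          rw [if_neg (show ¬((-1 : Int) ≠ -1 ∧ ((c.length : Int) + 1 + (n1 : Int) = -1 ∨ (-1 : Int) < (c.length : Int) + 1 + (n1 : Int))) from by rintro ⟨hh, -⟩; exact hh rfl)]
          rw [if_neg (show ¬(p2 ≠ -1 ∧ (p1 = -1 ∨ p2 < p1)) from by rintro ⟨hh, -⟩; exact hh h2)]
          rw [if_pos (show (c.length : Int) + 1 + (n1 : Int) ≠ -1 from by omega)]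
          rw [if_pos h1]
          rw [if_neg (show ¬(((c.length : Int) + 1 + (n1 : Int), (11 : Int)).1 = -1) from by intro hh; simp at hh; omega)]
          rw [if_neg (show ¬(((p1 : Int), (11 : Int)).1 = -1) from by simpa using h1)]
          rw [show ((c.length : Int) + 1 + (n1 : Int), (11 : Int)).1 + ((c.length : Int) + 1 + (n1 : Int), (11 : Int)).2 - 1 = ((c.length + 1 + (n1 + 10) : Nat) : Int) from by push_cast; ring]
          rw [show ((p1 : Int), (11 : Int)).1 + ((p1 : Int), (11 : Int)).2 - 1 = ((n1 + 10 : Nat) : Int) from by rw [hn1]; push_cast; ring]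
          rw [hjoin]
          have := pvTail_shift c t (n1 + 10) (by omega)
          simp only at this
          rw [this]
        · -- both markers occur: the smaller position wins on both sides
          obtain ⟨n1, hn1⟩ := Int.eq_ofNat_of_zero_le (show 0 ≤ p1 by omega)
          obtain ⟨n2, hn2⟩ := Int.eq_ofNat_of_zero_le (show 0 ≤ p2 by omega)
          have e1 : PySem.Chars.find ('/' :: PySem.Chars.lower (pvJoin (c :: c1 :: Q'))) ("/user data/" : String).toList = (c.length : Int) + 1 + (n1 : Int) := by
            rw [hsh1, if_neg h1, hn1]
          have e2 : PySem.Chars.find ('/' :: PySem.Chars.lower (pvJoin (c :: c1 :: Q'))) ("/profiles/" : String).toList = (c.length : Int) + 1 + (n2 : Int) := by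
            rw [hsh2, if_neg h2, hn2]
          rw [pvFold_eval _ _ _ e1 e2]
          rw [pvFold_eval ('/' :: PySem.Chars.lower t) p1 p2 hp1.symm hp2.symm]
          by_cases hlt : p2 < p1
          · have hltn : n2 < n1 := by rw [hn1, hn2] at hlt; exact_mod_cast hlt
            have hs2 : n2 + 10 ≤ 1 + t.length := by
              have := hlen2 h2
              rw [hn2] at this
              exact_mod_cast this
            rw [if_pos (show (c.length : Int) + 1 + (n2 : Int) ≠ -1 ∧ ((c.length : Int) + 1 + (n1 : Int) = -1 ∨ (c.length : Int) + 1 + (n2 : Int) < (c.length : Int) + 1 + (n1 : Int)) from ⟨by omega, Or.inr (by omega)⟩)]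
            rw [if_pos (show p2 ≠ -1 ∧ (p1 = -1 ∨ p2 < p1) from ⟨h2, Or.inr hlt⟩)]
            rw [if_neg (show ¬(((c.length : Int) + 1 + (n2 : Int), (10 : Int)).1 = -1) from by intro hh; simp at hh; omega)]
            rw [if_neg (show ¬(((p2 : Int), (10 : Int)).1 = -1) from by simpa using h2)]
            rw [show ((c.length : Int) + 1 + (n2 : Int), (10 : Int)).1 + ((c.length : Int) + 1 + (n2 : Int), (10 : Int)).2 - 1 = ((c.length + 1 + (n2 + 9) : Nat) : Int) from by push_cast; ring]
            rw [show ((p2 : Int), (10 : Int)).1 + ((p2 : Int), (10 : Int)).2 - 1 = ((n2 + 9 : Nat) : Int) from by rw [hn2]; push_cast; ring]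
            rw [hjoin]
            have := pvTail_shift c t (n2 + 9) (by omega)
            simp only at this
            rw [this]
          · have hge : n1 ≤ n2 := by
              have : ¬ ((n2 : Int) < (n1 : Int)) := by rw [← hn1, ← hn2]; exact hlt
              omega
            have hs1 : n1 + 11 ≤ 1 + t.length := by
              have := hlen1 h1
              rw [hn1] at this
              exact_mod_cast this
            rw [if_neg (show ¬((c.length : Int) + 1 + (n2 : Int) ≠ -1 ∧ ((c.length : Int) + 1 + (n1 : Int) = -1 ∨ (c.length : Int) + 1 + (n2 : Int) < (c.length : Int) + 1 + (n1 : Int))) from by rintro ⟨-, hor⟩; rcases hor with hh | hh <;> omega)]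
            rw [if_neg (show ¬(p2 ≠ -1 ∧ (p1 = -1 ∨ p2 < p1)) from by rintro ⟨-, hor⟩; rcases hor with hh | hh; exacts [h1 hh, hlt hh])]
            rw [if_pos (show (c.length : Int) + 1 + (n1 : Int) ≠ -1 from by omega)]
            rw [if_pos h1]
            rw [if_neg (show ¬(((c.length : Int) + 1 + (n1 : Int), (11 : Int)).1 = -1) from by intro hh; simp at hh; omega)]
            rw [if_neg (show ¬(((p1 : Int), (11 : Int)).1 = -1) from by simpa using h1)]
            rw [show ((c.length : Int) + 1 + (n1 : Int), (11 : Int)).1 + ((c.length : Int) + 1 + (n1 : Int), (11 : Int)).2 - 1 = ((c.length + 1 + (n1 + 10) : Nat) : Int) from by push_cast; ring]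
            rw [show ((p1 : Int), (11 : Int)).1 + ((p1 : Int), (11 : Int)).2 - 1 = ((n1 + 10 : Nat) : Int) from by rw [hn1]; push_cast; ring]
            rw [hjoin]
            have := pvTail_shift c t (n1 + 10) (by omega)
            simp only at this
            rw [this]

-- ===== VERDICT (by name: the statement is the Claim_ definition above) =====
theorem extract_profile_from_path_py_spec : Claim_equal_extract_profile_from_path_py := by
  intro path browser _
  unfold Spec_extract_profile_from_path_py extract_profile_from_path_py extract_profile_from_path_py_alt
  have hparts : (PySem.Str.split? (PySem.Str.replace path "\\" "/") "/").getD []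
      = ((pvSplit (PySem.Chars.replace path.toList ['\\'] ['/'])).1
          :: (pvSplit (PySem.Chars.replace path.toList ['\\'] ['/'])).2).map String.ofList := by
    rw [PySem.Str.split?]
    have h1 : (PySem.Str.replace path "\\" "/").toList
        = PySem.Chars.replace path.toList ['\\'] ['/'] := by
      simp [PySem.Str.replace]
    rw [h1]
    rw [show ("/" : String).toList = ['/'] from rfl]
    rw [PySem.Chars.split?]
    simp [pvSplitOn_eq]
  simp only [hparts]
  rw [show ((0 : Int) = ((0 : Nat) : Int)) from rfl]
  rw [pvLoopA_eq _ _ 0 (by simp), pvRecS_map]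
  rw [← pvMain ((pvSplit (PySem.Chars.replace path.toList ['\\'] ['/'])).1
      :: (pvSplit (PySem.Chars.replace path.toList ['\\'] ['/'])).2)
      (by
        intro p hp
        rcases List.mem_cons.mp hp with hp | hp
        · exact hp ▸ (pvSplit_slashfree _).1
        · exact (pvSplit_slashfree _).2 p hp)
      (by simp)]
  rw [pvSplit_join]
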